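-- pv_equiv track=rewrite | github.com/justincarroll32/business_analyzer | business_analyzer/demographic.py | add_up
-- ===== SOURCE A (Python) =====
-- def add_up(data: dict) -> tuple:
--     """Get remainder of population that is not accounted for (certain RACE/AGE codes not asked for)"""
--     all = 0
--     total = 0
--     for key, value in data.items():
--         if key == 'Total Population':
--             all = int(value)
--         else:
--             total = total + int(value)
--
--     return (all, total)
-- ===== SOURCE B (Python) =====
-- def add_up(data: dict) -> tuple:
--     """Get remainder of population that is not accounted for (certain RACE/AGE codes not asked for)"""
--     grand = sum(int(v) for v in data.values())
--     all = int(data.get('Total Population', 0))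
--     return (all, grand - all)
-- ===== Notes on version B (the rewrite author's own statement) =====
-- stated objective: simpler
-- what changed: Replaced the per-key branching accumulation loop by a single grand-total sum plus one direct dict lookup, deriving the remainder by subtraction.
import Mathlib
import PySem

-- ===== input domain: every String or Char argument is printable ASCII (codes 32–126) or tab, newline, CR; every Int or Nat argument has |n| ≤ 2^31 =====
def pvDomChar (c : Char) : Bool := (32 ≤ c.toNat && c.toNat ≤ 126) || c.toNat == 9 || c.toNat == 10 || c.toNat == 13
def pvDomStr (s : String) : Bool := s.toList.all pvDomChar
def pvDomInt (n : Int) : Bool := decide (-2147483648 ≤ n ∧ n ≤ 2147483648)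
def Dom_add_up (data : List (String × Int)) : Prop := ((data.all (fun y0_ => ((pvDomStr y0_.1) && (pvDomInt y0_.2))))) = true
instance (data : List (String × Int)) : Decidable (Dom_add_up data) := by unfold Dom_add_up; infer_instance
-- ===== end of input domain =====

-- B changes the decomposition (one grand sum + one lookup, remainder by subtraction) for simplicity; return values only.

-- ===== PORT A =====
-- the for-loop over items() with the two accumulators (all, total)
def add_up (data : List (String × Int)) : Int × Int :=
  data.foldl
    (fun (st : Int × Int) kv =>
      if kv.1 = "Total Population" then (kv.2, st.2) else (st.1, st.2 + kv.2))
    (0, 0)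

-- ===== PORT B =====
def add_up_alt (data : List (String × Int)) : Int × Int :=
  let grand := (data.map (fun kv => kv.2)).sum
  let a := (PySem.Dict.mk data).getD "Total Population" 0
  (a, grand - a)

-- ===== PRECONDITION & SPEC =====
-- Pre_ requires distinct keys: the Python argument is a dict, which an association
-- list with duplicate keys cannot represent (A's last-match vs B's first-match would
-- disagree only on such unrepresentable lists).
def Pre_add_up (data : List (String × Int)) : Prop := (data.map Prod.fst).Nodup
instance (data : List (String × Int)) : Decidable (Pre_add_up data) := by unfold Pre_add_up; infer_instance
def pvWitness_add_up : (List (String × Int)) := [("Total Population", 10), ("a", 3), ("b", 4)]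
def Spec_add_up (data : List (String × Int)) (out : Int × Int) : Prop := out = add_up_alt data
instance (data : List (String × Int)) (out : Int × Int) : Decidable (Spec_add_up data out) := by unfold Spec_add_up; infer_instance

-- ===== CLAIM (what is proved, stated in full; the proofs are below) =====
def Claim_equal_add_up : Prop := ∀ (data : List (String × Int)), Dom_add_up data → Pre_add_up data → Spec_add_up data (add_up data)

-- ===== LEMMAS AND PROOFS =====

-- A's loop over a segment containing no 'Total Population' key just adds the values to total
theorem add_up_foldl_no_tp (data : List (String × Int)) (a t : Int)
    (h : "Total Population" ∉ data.map Prod.fst) :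
    data.foldl
      (fun (st : Int × Int) kv =>
        if kv.1 = "Total Population" then (kv.2, st.2) else (st.1, st.2 + kv.2))
      (a, t) = (a, t + (data.map (fun kv => kv.2)).sum) := by
  induction data generalizing t with
  | nil => simp
  | cons kv rest ih =>
    simp only [List.map_cons, List.mem_cons] at h
    push_neg at h
    simp only [List.foldl_cons, if_neg (fun he => h.1 (Eq.symm he))]
    rw [ih _ h.2]
    simp [add_assoc]

-- the initial 'total' accumulator passes straight through A's loop
theorem add_up_foldl_shift (data : List (String × Int)) (a t : Int) :
    data.foldl
      (fun (st : Int × Int) kv =>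
        if kv.1 = "Total Population" then (kv.2, st.2) else (st.1, st.2 + kv.2))
      (a, t)
    = ((data.foldl
        (fun (st : Int × Int) kv =>
          if kv.1 = "Total Population" then (kv.2, st.2) else (st.1, st.2 + kv.2))
        (a, 0)).1,
       t + (data.foldl
        (fun (st : Int × Int) kv =>
          if kv.1 = "Total Population" then (kv.2, st.2) else (st.1, st.2 + kv.2))
        (a, 0)).2) := by
  induction data generalizing a t with
  | nil => simp
  | cons x xs ih =>
    by_cases hx : x.1 = "Total Population"
    · simp only [List.foldl_cons, if_pos hx]
      rw [ih x.2 t]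
    · simp only [List.foldl_cons, if_neg hx]
      rw [ih a (t + x.2), ih a (0 + x.2)]
      simp [add_assoc]

theorem add_up_spec : Claim_equal_add_up := by
  unfold Claim_equal_add_up
  intro data hdom hpre
  unfold Spec_add_up add_up add_up_alt Pre_add_up at *
  induction data with
  | nil => decide
  | cons kv rest ih =>
    have hdr : Dom_add_up rest := by
      unfold Dom_add_up at hdom ⊢
      simp only [List.all_cons, Bool.and_eq_true] at hdom
      exact hdom.2
    obtain ⟨k, v⟩ := kv
    simp only [List.map_cons, List.nodup_cons] at hpre
    by_cases hk : k = "Total Population"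
    · have hno : "Total Population" ∉ rest.map Prod.fst := by
        rw [← hk]; exact hpre.1
      simp only [List.foldl_cons, if_pos hk]
      rw [add_up_foldl_no_tp rest v 0 hno]
      have hget : (PySem.Dict.mk ((k, v) :: rest)).getD "Total Population" 0 = v := by
        simp [PySem.Dict.getD_eq_get?_getD, PySem.Dict.get?_mk_cons, hk]
      simp [hget]
    · have hrest := ih hdr hpre.2
      have hget : (PySem.Dict.mk ((k, v) :: rest)).getD "Total Population" 0
          = (PySem.Dict.mk rest).getD "Total Population" 0 := by
        simp [PySem.Dict.getD_eq_get?_getD, PySem.Dict.get?_mk_cons, hk]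
      simp only [List.foldl_cons, if_neg hk, zero_add]
      rw [add_up_foldl_shift rest 0 v, hrest]
      simp only [hget, List.map_cons, List.sum_cons]
      apply Prod.ext
      · rfl
      · simp; ring

-- ===== VERDICT (by name: the statement is the Claim_ definition above) =====
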